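-- pv_equiv track=rewrite | github.com/Ic1558/0luka | core/task_dispatcher.py | _reason_code_from_guard
-- ===== SOURCE A (Python) =====
-- def _reason_code_from_guard(violations: list[str]) -> str:
--     if any(v.startswith("invalid:absolute_root") for v in violations):
--         return "ROOT_ABSOLUTE"
--     if any(v.startswith("missing_or_invalid:") for v in violations):
--         return "MISSING_REQUIRED_FIELDS"
--     if any("invalid_type" in v or "missing_op_id" in v for v in violations):
--         return "INVALID_OPS"
--     return "MALFORMED_TASK"
-- ===== SOURCE B (Python) =====
-- _CODES = ("ROOT_ABSOLUTE", "MISSING_REQUIRED_FIELDS", "INVALID_OPS", "MALFORMED_TASK")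
--
-- def _rank(v: str) -> int:
--     if v.startswith("invalid:absolute_root"):
--         return 0
--     if v.startswith("missing_or_invalid:"):
--         return 1
--     if "invalid_type" in v or "missing_op_id" in v:
--         return 2
--     return 3
--
-- def _reason_code_from_guard(violations: list[str]) -> str:
--     return _CODES[min(map(_rank, violations), default=3)]
-- ===== Notes on version B (the rewrite author's own statement) =====
-- stated objective: alternative
-- what changed: Replaces prioritized short-circuit any() scans with a rank-and-reduce scheme: each violation is classified into a numeric severity rank, the minimum rank is taken over the list, and the reason code is looked up in a priority table.
import Mathlib
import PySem

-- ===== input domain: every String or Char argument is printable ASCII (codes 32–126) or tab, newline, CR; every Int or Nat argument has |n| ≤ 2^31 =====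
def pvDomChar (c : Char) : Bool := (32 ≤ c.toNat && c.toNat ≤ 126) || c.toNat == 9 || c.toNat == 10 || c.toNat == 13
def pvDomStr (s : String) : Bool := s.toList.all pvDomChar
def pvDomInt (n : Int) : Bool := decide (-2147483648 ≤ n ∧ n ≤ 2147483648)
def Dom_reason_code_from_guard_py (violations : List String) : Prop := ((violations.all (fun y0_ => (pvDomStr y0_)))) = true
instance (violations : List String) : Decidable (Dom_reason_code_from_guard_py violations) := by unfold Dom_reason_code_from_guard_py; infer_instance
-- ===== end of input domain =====

-- B replaces A's prioritized short-circuit scans with rank-and-reduce: classify each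
-- violation to a numeric severity rank, take the minimum rank, index a priority table
-- (alternative decomposition, same O(n) cost).
-- ===== PORT A =====
def reason_code_from_guard_py (violations : List String) : String :=
  if violations.any (fun v => PySem.Str.startswith v "invalid:absolute_root") then "ROOT_ABSOLUTE"
  else if violations.any (fun v => PySem.Str.startswith v "missing_or_invalid:") then "MISSING_REQUIRED_FIELDS"
  else if violations.any (fun v => PySem.Str.isIn "invalid_type" v || PySem.Str.isIn "missing_op_id" v) then "INVALID_OPS"
  else "MALFORMED_TASK"

-- ===== PORT B =====
def pvCodes : List String := ["ROOT_ABSOLUTE", "MISSING_REQUIRED_FIELDS", "INVALID_OPS", "MALFORMED_TASK"]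

def pvRank (v : String) : Nat :=
  if PySem.Str.startswith v "invalid:absolute_root" then 0
  else if PySem.Str.startswith v "missing_or_invalid:" then 1
  else if PySem.Str.isIn "invalid_type" v || PySem.Str.isIn "missing_op_id" v then 2
  else 3

def reason_code_from_guard_py_alt (violations : List String) : String :=
  pvCodes.getD ((violations.map pvRank).foldl min 3) ""

-- ===== PRECONDITION & SPEC =====
def Spec_reason_code_from_guard_py (violations : List String) (out : String) : Prop := out = reason_code_from_guard_py_alt violations
instance (violations : List String) (out : String) : Decidable (Spec_reason_code_from_guard_py violations out) := by unfold Spec_reason_code_from_guard_py; infer_instance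

-- ===== CLAIM (what is proved, stated in full; the proofs are below) =====
def Claim_equal_reason_code_from_guard_py : Prop := ∀ (violations : List String), Dom_reason_code_from_guard_py violations → Spec_reason_code_from_guard_py violations (reason_code_from_guard_py violations)

-- ===== LEMMAS AND PROOFS =====
lemma pvRank_le (v : String) : pvRank v ≤ 3 := by
  unfold pvRank; split_ifs <;> omega

lemma pvMinMerge (a : Nat) (b0 b1 b2 c0 c1 c2 : Bool) :
    min (min a (if b0 then 0 else if b1 then 1 else if b2 then 2 else 3))
        (if c0 then 0 else if c1 then 1 else if c2 then 2 else 3) =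
      min a (if (b0 || c0) then 0 else if (b1 || c1) then 1 else if (b2 || c2) then 2 else 3) := by
  cases b0 <;> cases b1 <;> cases b2 <;> cases c0 <;> cases c1 <;> cases c2 <;> simp

lemma pvFoldMin_eq (vs : List String) (a : Nat) (ha : a ≤ 3) :
    (vs.map pvRank).foldl min a =
      min a (if vs.any (fun v => PySem.Str.startswith v "invalid:absolute_root") then 0
        else if vs.any (fun v => PySem.Str.startswith v "missing_or_invalid:") then 1
        else if vs.any (fun v => PySem.Str.isIn "invalid_type" v || PySem.Str.isIn "missing_op_id" v) then 2
        else 3) := by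
  induction vs generalizing a with
  | nil => simpa using (Nat.min_eq_left ha).symm
  | cons h t ih =>
    simp only [List.map_cons, List.foldl_cons, List.any_cons]
    rw [ih (min a (pvRank h)) (le_trans (min_le_right _ _) (pvRank_le h))]
    unfold pvRank
    exact pvMinMerge a _ _ _ _ _ _

-- ===== VERDICT (by name: the statement is the Claim_ definition above) =====
theorem reason_code_from_guard_py_spec : Claim_equal_reason_code_from_guard_py := by
  intro violations _
  unfold Spec_reason_code_from_guard_py reason_code_from_guard_py reason_code_from_guard_py_alt
  rw [pvFoldMin_eq _ _ (by omega)]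
  split_ifs <;> rfl
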